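-- pv_equiv track=rewrite | github.com/AhmedKabbary/DSS-Tasks | tasks/algorithms/methods.py | minimax_regret
-- ===== SOURCE A (Python) =====
-- def minimax_regret(rows: int, columns: int, matrix) -> str:
--     # 1. get max value from each column
--     max_values = []
--     for c in range(columns):
--         values = []
--         for r in range(rows):
--             num = matrix[r][c]
--             values.append(num)
--         max_values.append(max(values))
--
--     # 2. subtract each value from max value
--     new_values = []
--     for c in range(columns):
--         new_values.append([])
--         for r in range(rows):
--             num = matrix[r][c]
--             new_values[c].append(max_values[c] - num)
--
--     # 3. get max value from each row
--     max_values = []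
--     for r in range(rows):
--         values = []
--         for c in range(columns):
--             num = new_values[c][r]
--             values.append(num)
--         max_values.append(max(values))
--
--     # 4. pick minimum value from max_values
--     min_value = min(max_values)
--
--     project = f"project {max_values.index(min_value) + 1}"
--     return f"{min_value} {project}"
-- ===== SOURCE B (Python) =====
-- def minimax_regret(rows: int, columns: int, matrix) -> str:
--     # Stream the matrix column by column: take each column's max once and fold its
--     # regrets into a single per-row accumulator with an elementwise max; no regret
--     # matrix is ever built and rows are never scanned per-row.
--     maxreg = None
--     for c in range(columns):
--         col = [matrix[r][c] for r in range(rows)]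
--         m = max(col)
--         d = [m - v for v in col]
--         maxreg = d if maxreg is None else [max(a, b) for a, b in zip(maxreg, d)]
--     best = min(maxreg)
--     return f"{best} project {maxreg.index(best) + 1}"
-- ===== Notes on version B (the rewrite author's own statement) =====
-- stated objective: alternative
-- what changed: A makes four staged index-driven passes (column-max list, a full column-major regret matrix, a row-maxima list, then min + .index); B streams the transposed matrix column by column, folding each column's regrets into one per-row accumulator with an elementwise max, so the traversal order is transposed and only a single length-rows vector is ever maintained.
import Mathlib
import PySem

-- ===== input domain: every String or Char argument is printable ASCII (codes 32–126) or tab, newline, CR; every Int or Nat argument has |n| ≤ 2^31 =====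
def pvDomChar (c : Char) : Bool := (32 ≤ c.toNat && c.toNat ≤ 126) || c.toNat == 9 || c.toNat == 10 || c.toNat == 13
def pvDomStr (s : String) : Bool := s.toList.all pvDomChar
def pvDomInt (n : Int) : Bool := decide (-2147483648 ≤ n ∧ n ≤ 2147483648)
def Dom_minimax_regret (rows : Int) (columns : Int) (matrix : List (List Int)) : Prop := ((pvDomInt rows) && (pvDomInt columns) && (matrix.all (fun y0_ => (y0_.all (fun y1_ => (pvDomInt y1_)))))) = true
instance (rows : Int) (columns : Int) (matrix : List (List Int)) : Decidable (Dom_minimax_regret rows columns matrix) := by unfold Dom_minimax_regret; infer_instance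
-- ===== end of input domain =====

-- B streams the transposed matrix column by column, folding each column's regrets into a
-- single per-row accumulator by elementwise max (objective: alternative decomposition).


-- ===== PORT A =====
def minimax_regret (rows : Int) (columns : Int) (matrix : List (List Int)) : String :=
  -- 1. max value of each column
  let max_values := (PySem.List.pyRange 0 columns 1).map (fun c =>
    let values := (PySem.List.pyRange 0 rows 1).map (fun r =>
      PySem.List.pyGetD (PySem.List.pyGetD matrix r []) c 0)
    (PySem.List.max? values (fun x => x)).getD 0)
  -- 2. subtract each value from the column max (regret matrix, column-major)
  let new_values := (PySem.List.pyRange 0 columns 1).map (fun c =>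
    (PySem.List.pyRange 0 rows 1).map (fun r =>
      PySem.List.pyGetD max_values c 0 - PySem.List.pyGetD (PySem.List.pyGetD matrix r []) c 0))
  -- 3. max value of each row of the regret matrix
  let max_values2 := (PySem.List.pyRange 0 rows 1).map (fun r =>
    let values := (PySem.List.pyRange 0 columns 1).map (fun c =>
      PySem.List.pyGetD (PySem.List.pyGetD new_values c []) r 0)
    (PySem.List.max? values (fun x => x)).getD 0)
  -- 4. minimum of the row maxima, and its first index
  let min_value := (PySem.List.min? max_values2 (fun x => x)).getD 0
  let project := "project " ++ PySem.Int.toStr (((PySem.List.index? max_values2 min_value).getD 0 : Int) + 1)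
  PySem.Int.toStr min_value ++ " " ++ project

-- ===== PORT B =====
-- the loop body of Source B: a column's regrets, and folding them into the accumulator
def pvRegretCol (col : List Int) : List Int :=
  let m := (PySem.List.max? col (fun x => x)).getD 0
  col.map (fun v => m - v)

def pvAccum (acc : Option (List Int)) (col : List Int) : Option (List Int) :=
  match acc with
  | none => some (pvRegretCol col)
  | some prev => some ((prev.zip (pvRegretCol col)).map (fun p => max p.1 p.2))

def minimax_regret_alt (rows : Int) (columns : Int) (matrix : List (List Int)) : String :=
  let mr := ((PySem.List.pyRange 0 columns 1).foldl (fun acc c =>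
      pvAccum acc ((PySem.List.pyRange 0 rows 1).map (fun r =>
        PySem.List.pyGetD (PySem.List.pyGetD matrix r []) c 0))) none).getD []
  let best := (PySem.List.min? mr (fun x => x)).getD 0
  PySem.Int.toStr best ++ " project " ++
    PySem.Int.toStr (((PySem.List.index? mr best).getD 0 : Int) + 1)

-- ===== PRECONDITION & SPEC =====
-- Pre_ excludes exactly the inputs where A raises: rows ≤ 0 or columns ≤ 0 (max()/min() of an
-- empty sequence → ValueError) and matrices whose first `rows` rows are missing or shorter than
-- `columns` (IndexError).
def Pre_minimax_regret (rows : Int) (columns : Int) (matrix : List (List Int)) : Prop :=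
  0 < rows ∧ 0 < columns ∧ rows ≤ (matrix.length : Int) ∧
  ∀ row ∈ matrix.take rows.toNat, columns ≤ (row.length : Int)
instance (rows : Int) (columns : Int) (matrix : List (List Int)) : Decidable (Pre_minimax_regret rows columns matrix) := by unfold Pre_minimax_regret; infer_instance

def pvWitness_minimax_regret : Int × Int × List (List Int) := (2, 2, [[1, 4], [3, 2]])

def Spec_minimax_regret (rows : Int) (columns : Int) (matrix : List (List Int)) (out : String) : Prop := out = minimax_regret_alt rows columns matrix
instance (rows : Int) (columns : Int) (matrix : List (List Int)) (out : String) : Decidable (Spec_minimax_regret rows columns matrix out) := by unfold Spec_minimax_regret; infer_instance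

-- ===== CLAIM (what is proved, stated in full; the proofs are below) =====
def Claim_equal_minimax_regret : Prop := ∀ (rows : Int) (columns : Int) (matrix : List (List Int)), Dom_minimax_regret rows columns matrix → Pre_minimax_regret rows columns matrix → Spec_minimax_regret rows columns matrix (minimax_regret rows columns matrix)

-- ===== LEMMAS AND PROOFS =====

theorem pvStr_assoc (s t : String) : s ++ " " ++ ("project " ++ t) = s ++ " project " ++ t := by
  rw [String.append_assoc, String.append_assoc]
  congr 1

-- folding pvAccum from a `some` state never returns to `none`
theorem pvAccum_some : ∀ (cs : List (List Int)) (p : List Int),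
    cs.foldl pvAccum (some p)
      = some (cs.foldl (fun prev col => ((prev.zip (pvRegretCol col)).map (fun q => max q.1 q.2))) p) := by
  intro cs
  induction cs with
  | nil => intro p; rfl
  | cons c t ih => intro p; simp only [List.foldl_cons, pvAccum]; exact ih _

-- elementwise max of two equal-length range-maps
theorem pvZipMax_ranges (n : Nat) (f g : Nat → Int) :
    ((((List.range n).map f).zip ((List.range n).map g)).map (fun q => max q.1 q.2))
      = (List.range n).map (fun r => max (f r) (g r)) := by
  rw [List.zip_map']
  rw [List.map_map]
  rfl

-- the elementwise-max fold over columns, pointwise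
theorem pvFold_pointwise (n : Nat) (h : Nat → Nat → Int) : ∀ (cidx : List Nat) (f : Nat → Int),
    cidx.foldl (fun prev c => ((prev.zip ((List.range n).map (fun r => h c r))).map (fun q => max q.1 q.2)))
        ((List.range n).map f)
      = (List.range n).map (fun r => cidx.foldl (fun a c => max a (h c r)) (f r)) := by
  intro cidx
  induction cidx with
  | nil => intro f; rfl
  | cons c t ih =>
    intro f
    simp only [List.foldl_cons]
    rw [pvZipMax_ranges n f (fun r => h c r), ih (fun r => max (f r) (h c r))]

-- regrets of a column given as a range-map
theorem pvRegretCol_range (n : Nat) (g : Nat → Int) :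
    pvRegretCol ((List.range n).map g)
      = (List.range n).map (fun r =>
          (PySem.List.max? ((List.range n).map g) (fun x => x)).getD 0 - g r) := by
  unfold pvRegretCol
  rw [List.map_map]
  rfl

-- ===== VERDICT (by name: the statement is the Claim_ definition above) =====
theorem minimax_regret_spec : Claim_equal_minimax_regret := by
  intro rows columns matrix _ hPre
  obtain ⟨hr, hc, hlen, hrow⟩ := hPre
  show minimax_regret rows columns matrix = minimax_regret_alt rows columns matrix
  simp only [minimax_regret, minimax_regret_alt]
  have hM : ((PySem.List.pyRange 0 rows 1).map (fun r =>
      (PySem.List.max? ((PySem.List.pyRange 0 columns 1).map (fun c =>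
        PySem.List.pyGetD (PySem.List.pyGetD ((PySem.List.pyRange 0 columns 1).map (fun c =>
          (PySem.List.pyRange 0 rows 1).map (fun r =>
            PySem.List.pyGetD ((PySem.List.pyRange 0 columns 1).map (fun c =>
              (PySem.List.max? ((PySem.List.pyRange 0 rows 1).map (fun r =>
                PySem.List.pyGetD (PySem.List.pyGetD matrix r []) c 0)) (fun x => x)).getD 0)) c 0
            - PySem.List.pyGetD (PySem.List.pyGetD matrix r []) c 0))) c []) r 0)) (fun x => x)).getD 0))
      = (PySem.List.pyRange 0 rows 1).map (fun r =>
      (PySem.List.max? ((PySem.List.pyRange 0 columns 1).map (fun c =>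
        PySem.List.pyGetD ((PySem.List.pyRange 0 columns 1).map (fun c =>
          (PySem.List.max? ((PySem.List.pyRange 0 rows 1).map (fun r =>
            PySem.List.pyGetD (PySem.List.pyGetD matrix r []) c 0)) (fun x => x)).getD 0)) c 0
        - PySem.List.pyGetD (PySem.List.pyGetD matrix r []) c 0)) (fun x => x)).getD 0) := by
    apply List.map_congr_left
    intro r hrmem
    rw [PySem.List.mem_pyRange_one] at hrmem
    congr 1
    congr 1
    apply List.map_congr_left
    intro c hcmem
    rw [PySem.List.mem_pyRange_one] at hcmem
    rw [PySem.List.pyGetD_map_pyRange_of_nonneg _ _ _ _ (by simpa using hcmem.1) (by simpa using hcmem.2),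
        PySem.List.pyGetD_map_pyRange_of_nonneg _ _ _ _ (by simpa using hrmem.1) (by simpa using hrmem.2)]
  rw [hM]
  have hrangeR : PySem.List.pyRange 0 rows 1 = (List.range rows.toNat).map (fun (j : Nat) => (j : Int)) := by
    rw [PySem.List.pyRange_one]; simp only [sub_zero, zero_add]
  have hrangeC : PySem.List.pyRange 0 columns 1 = (List.range columns.toNat).map (fun (j : Nat) => (j : Int)) := by
    rw [PySem.List.pyRange_one]; simp only [sub_zero, zero_add]
  simp only [hrangeR, hrangeC, List.map_map, Function.comp_def, PySem.List.pyGetD_natCast,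
    List.foldl_map]
  have hgetD : ∀ (f : Nat → Int) (c t : Nat), c < t → ((List.range t).map f).getD c 0 = f c := by
    intro f c t hct
    rw [List.getD_eq_getElem _ _ (by simpa using hct)]
    simp
  obtain ⟨k', hk'⟩ : ∃ k', columns.toNat = k' + 1 := ⟨columns.toNat - 1, by omega⟩
  have hAB : (List.range rows.toNat).map (fun r =>
        (PySem.List.max? ((List.range columns.toNat).map (fun c =>
          ((List.range columns.toNat).map (fun c =>
            (PySem.List.max? ((List.range rows.toNat).map (fun r2 =>
              (matrix.getD r2 []).getD c 0)) (fun x => x)).getD 0)).getD c 0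
          - (matrix.getD r []).getD c 0)) (fun x => x)).getD 0)
      = ((List.range columns.toNat).foldl (fun acc c =>
          pvAccum acc ((List.range rows.toNat).map (fun r =>
            (matrix.getD r []).getD c 0))) none).getD [] := by
    -- A side: drop the colmax-list indirection
    have hA1 : (List.range rows.toNat).map (fun r =>
          (PySem.List.max? ((List.range columns.toNat).map (fun c =>
            ((List.range columns.toNat).map (fun c =>
              (PySem.List.max? ((List.range rows.toNat).map (fun r2 =>
                (matrix.getD r2 []).getD c 0)) (fun x => x)).getD 0)).getD c 0
            - (matrix.getD r []).getD c 0)) (fun x => x)).getD 0)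
        = (List.range rows.toNat).map (fun r =>
            (PySem.List.max? ((List.range columns.toNat).map (fun c =>
              (PySem.List.max? ((List.range rows.toNat).map (fun r2 =>
                (matrix.getD r2 []).getD c 0)) (fun x => x)).getD 0
              - (matrix.getD r []).getD c 0)) (fun x => x)).getD 0) := by
      apply List.map_congr_left
      intro r _
      congr 1
      congr 1
      apply List.map_congr_left
      intro c hcm
      rw [hgetD _ c columns.toNat (List.mem_range.mp hcm)]
    rw [hA1, ← List.foldl_map (f := fun (c : Nat) =>
        (List.range rows.toNat).map (fun r => (matrix.getD r []).getD c 0)) (g := pvAccum)]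
    rw [hk', List.range_succ_eq_map]
    simp only [List.map_cons, List.foldl_cons]
    rw [show pvAccum none ((List.range rows.toNat).map (fun r => (matrix.getD r []).getD 0 0))
          = some (pvRegretCol ((List.range rows.toNat).map (fun r => (matrix.getD r []).getD 0 0))) from rfl]
    rw [pvAccum_some, List.foldl_map]
    simp only [pvRegretCol_range]
    rw [pvFold_pointwise rows.toNat
        (fun c r => (PySem.List.max? ((List.range rows.toNat).map (fun r2 =>
            (matrix.getD r2 []).getD c 0)) (fun x => x)).getD 0 - (matrix.getD r []).getD c 0)
        ((List.range k').map Nat.succ)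
        (fun r => (PySem.List.max? ((List.range rows.toNat).map (fun r2 =>
            (matrix.getD r2 []).getD 0 0)) (fun x => x)).getD 0 - (matrix.getD r []).getD 0 0)]
    rw [Option.getD_some]
    apply List.map_congr_left
    intro r _
    simp only [PySem.List.max?_id_cons, Option.getD_some, List.foldl_map]
  rw [hAB, pvStr_assoc]
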